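-- pv_equiv track=rewrite | github.com/a43554/sail_web_server | interface/views/api/utils_plan_operations.py | two_dimensional_calendar
-- ===== SOURCE A (Python) =====
-- def two_dimensional_calendar(days, daily_shifts, valid_shift_list):
--     # Create the full data array.
--     full_array = []
--     # Iterate through all daily shifts.
--     for day_shift in range(0, daily_shifts):
--         # The inner array.
--         inner_array = []
--         # Iterate through the days.
--         for day in range(0, days):
--             # Add true if present, false otherwise.
--             inner_array.append(((day * daily_shifts) + day_shift) in valid_shift_list)
--         # Add the inner array.
--         full_array.append(inner_array)
--     # Return the full array
--     return full_array
-- ===== SOURCE B (Python) =====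
-- def two_dimensional_calendar(days, daily_shifts, valid_shift_list):
--     # Build the all-False grid, then scatter marks from the listed values.
--     grid = [[False] * days for _ in range(daily_shifts)]
--     if daily_shifts > 0:
--         for v in valid_shift_list:
--             if v >= 0:
--                 d, ds = divmod(v, daily_shifts)
--                 if d < days:
--                     grid[ds][d] = True
--     return grid
-- ===== Notes on version B (the rewrite author's own statement) =====
-- stated objective: faster
-- what changed: Instead of testing membership of every cell's shift index in valid_shift_list (a linear scan per cell), B builds the all-False grid once and makes a single pass over valid_shift_list, scattering each value v via divmod(v, daily_shifts) into its cell.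
import Mathlib
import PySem

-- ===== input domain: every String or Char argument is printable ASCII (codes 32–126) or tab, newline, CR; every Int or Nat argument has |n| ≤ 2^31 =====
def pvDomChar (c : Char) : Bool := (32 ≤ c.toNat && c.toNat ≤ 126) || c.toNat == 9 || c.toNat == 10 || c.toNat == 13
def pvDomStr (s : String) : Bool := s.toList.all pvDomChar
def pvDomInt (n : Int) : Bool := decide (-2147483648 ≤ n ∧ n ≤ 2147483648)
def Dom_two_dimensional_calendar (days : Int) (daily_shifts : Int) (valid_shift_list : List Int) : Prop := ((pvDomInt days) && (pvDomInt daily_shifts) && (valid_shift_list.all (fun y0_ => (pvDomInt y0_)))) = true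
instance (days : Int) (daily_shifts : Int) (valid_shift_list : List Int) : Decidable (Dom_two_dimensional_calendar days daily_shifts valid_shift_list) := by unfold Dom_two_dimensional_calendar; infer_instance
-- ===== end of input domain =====

-- B replaces the per-cell membership scan with one grid allocation plus a single
-- scatter pass over valid_shift_list (divmod places each value), changing
-- O(days*daily_shifts*len(list)) into O(days*daily_shifts + len(list)).

-- ===== PORT A =====
def two_dimensional_calendar (days : Int) (daily_shifts : Int) (valid_shift_list : List Int) : List (List Bool) :=
  -- for day_shift in range(0, daily_shifts): build inner by appending, append to full
  (PySem.List.pyRange 0 daily_shifts 1).foldl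
    (fun full_array day_shift =>
      full_array ++
        [(PySem.List.pyRange 0 days 1).foldl
          (fun inner_array day =>
            inner_array ++ [decide ((day * daily_shifts + day_shift) ∈ valid_shift_list)]) []])
    []

-- ===== PORT B =====
def two_dimensional_calendar_alt (days : Int) (daily_shifts : Int) (valid_shift_list : List Int) : List (List Bool) :=
  -- grid = [[False]*days for _ in range(daily_shifts)]  (negative sizes give empty, as in Python)
  let grid := List.replicate daily_shifts.toNat (List.replicate days.toNat false)
  if 0 < daily_shifts then
    valid_shift_list.foldl
      (fun g v =>
        if 0 ≤ v then
          let d := PySem.Int.floordiv v daily_shifts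
          let ds := PySem.Int.mod v daily_shifts
          if d < days then g.modify ds.toNat (fun row => row.set d.toNat true) else g
        else g)
      grid
  else grid

-- ===== PRECONDITION & SPEC =====
def Spec_two_dimensional_calendar (days : Int) (daily_shifts : Int) (valid_shift_list : List Int) (out : List (List Bool)) : Prop := out = two_dimensional_calendar_alt days daily_shifts valid_shift_list
instance (days : Int) (daily_shifts : Int) (valid_shift_list : List Int) (out : List (List Bool)) : Decidable (Spec_two_dimensional_calendar days daily_shifts valid_shift_list out) := by unfold Spec_two_dimensional_calendar; infer_instance

-- ===== CLAIM (what is proved, stated in full; the proofs are below) =====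
def Claim_equal_two_dimensional_calendar : Prop := ∀ (days : Int) (daily_shifts : Int) (valid_shift_list : List Int), Dom_two_dimensional_calendar days daily_shifts valid_shift_list → Spec_two_dimensional_calendar days daily_shifts valid_shift_list (two_dimensional_calendar days daily_shifts valid_shift_list)

-- ===== LEMMAS AND PROOFS =====

-- foldl-with-append builds a map
theorem foldl_append_map {α β : Type} (f : α → β) (l : List α) (init : List β) :
    l.foldl (fun acc x => acc ++ [f x]) init = init ++ l.map f := by
  induction l generalizing init with
  | nil => simp
  | cons x xs ih => simp [List.foldl, ih]

-- the scatter step of B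
def pvStep (days daily_shifts : Int) (g : List (List Bool)) (v : Int) : List (List Bool) :=
  if 0 ≤ v then
    if PySem.Int.floordiv v daily_shifts < days then
      g.modify (PySem.Int.mod v daily_shifts).toNat
        (fun row => row.set (PySem.Int.floordiv v daily_shifts).toNat true)
    else g
  else g

theorem pvStep_length (days daily_shifts : Int) (g : List (List Bool)) (v : Int) :
    (pvStep days daily_shifts g v).length = g.length := by
  unfold pvStep; split_ifs <;> simp

theorem pvStep_row_length (days daily_shifts : Int) (g : List (List Bool)) (v : Int)
    (s : Nat) (hs : s < g.length) (hs' : s < (pvStep days daily_shifts g v).length) :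
    (pvStep days daily_shifts g v)[s].length = g[s].length := by
  unfold pvStep
  split_ifs <;> simp [List.getElem_modify]
  split_ifs <;> simp

theorem pvStep_getElem (days daily_shifts : Int) (hpos : 0 < daily_shifts)
    (g : List (List Bool)) (v : Int) (s d : Nat)
    (hs : s < g.length) (hd : d < g[s].length) (hdd : (d : Int) < days)
    (hs' : s < (pvStep days daily_shifts g v).length)
    (hd' : d < (pvStep days daily_shifts g v)[s].length) :
    (pvStep days daily_shifts g v)[s][d] =
      (g[s][d] ||
        decide (0 ≤ v ∧ PySem.Int.floordiv v daily_shifts = (d : Int) ∧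
                PySem.Int.mod v daily_shifts = (s : Int))) := by
  by_cases h0 : 0 ≤ v
  · by_cases hfd : PySem.Int.floordiv v daily_shifts < days
    · have hmnn : 0 ≤ PySem.Int.mod v daily_shifts := PySem.Int.mod_nonneg v hpos
      have hfnn : 0 ≤ PySem.Int.floordiv v daily_shifts := by
        have h1 := PySem.Int.floordiv_mul_add_mod v daily_shifts
        have h2 := PySem.Int.mod_lt v hpos
        nlinarith
      by_cases hseq : (PySem.Int.mod v daily_shifts).toNat = s
      · by_cases hdeq : (PySem.Int.floordiv v daily_shifts).toNat = d
        · have h1 : PySem.Int.floordiv v daily_shifts = (d : Int) := by omega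
          have h2 : PySem.Int.mod v daily_shifts = (s : Int) := by omega
          simp [pvStep, h0, h1, h2, hdd, List.getElem_modify, List.getElem_set]
        · have h1 : ¬ PySem.Int.floordiv v daily_shifts = (d : Int) := by omega
          simp [pvStep, h0, hfd, hseq, hdeq, h1, List.getElem_modify, List.getElem_set]
      · have h1 : ¬ PySem.Int.mod v daily_shifts = (s : Int) := by omega
        simp [pvStep, h0, hfd, hseq, h1, List.getElem_modify]
    · have h1 : ¬ PySem.Int.floordiv v daily_shifts = (d : Int) := by
        intro h; rw [h] at hfd; exact hfd hdd
      simp [pvStep, h0, hfd, h1]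
  · simp [pvStep, h0]

-- folding pvStep: entrywise characterisation
theorem scatter_getElem (days daily_shifts : Int) (hpos : 0 < daily_shifts)
    (vsl : List Int) (g : List (List Bool)) (s d : Nat)
    (hs : s < g.length) (hd : d < g[s].length) (hdd : (d : Int) < days)
    (hs' : s < (vsl.foldl (pvStep days daily_shifts) g).length)
    (hd' : d < (vsl.foldl (pvStep days daily_shifts) g)[s].length) :
    (vsl.foldl (pvStep days daily_shifts) g)[s][d] =
      (g[s][d] ||
        decide (∃ v ∈ vsl, 0 ≤ v ∧ PySem.Int.floordiv v daily_shifts = (d : Int) ∧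
                PySem.Int.mod v daily_shifts = (s : Int))) := by
  induction vsl generalizing g with
  | nil => simp
  | cons v vs ih =>
    simp only [List.foldl_cons]
    have hs1 : s < (pvStep days daily_shifts g v).length := by
      rw [pvStep_length]; exact hs
    have hd1 : d < (pvStep days daily_shifts g v)[s].length := by
      rw [pvStep_row_length days daily_shifts g v s hs hs1]; exact hd
    rw [ih (pvStep days daily_shifts g v) hs1 hd1]
    rw [pvStep_getElem days daily_shifts hpos g v s d hs hd hdd hs1 hd1]
    have hcons : (∃ w ∈ (v :: vs), 0 ≤ w ∧ PySem.Int.floordiv w daily_shifts = (d : Int) ∧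
        PySem.Int.mod w daily_shifts = (s : Int)) ↔
        ((0 ≤ v ∧ PySem.Int.floordiv v daily_shifts = (d : Int) ∧
          PySem.Int.mod v daily_shifts = (s : Int)) ∨
         (∃ w ∈ vs, 0 ≤ w ∧ PySem.Int.floordiv w daily_shifts = (d : Int) ∧
          PySem.Int.mod w daily_shifts = (s : Int))) := by
      simp [List.mem_cons, or_and_right, exists_or]
    by_cases hPv : (0 ≤ v ∧ PySem.Int.floordiv v daily_shifts = (d : Int) ∧
        PySem.Int.mod v daily_shifts = (s : Int)) <;>
      simp [hcons, hPv, Bool.or_assoc]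

-- the membership condition is the unique divmod decomposition
theorem mem_iff_divmod (days daily_shifts : Int) (hpos : 0 < daily_shifts)
    (vsl : List Int) (s d : Nat) (hsd : (s : Int) < daily_shifts) :
    (∃ v ∈ vsl, 0 ≤ v ∧ PySem.Int.floordiv v daily_shifts = (d : Int) ∧
        PySem.Int.mod v daily_shifts = (s : Int)) ↔
      ((d : Int) * daily_shifts + (s : Int)) ∈ vsl := by
  constructor
  · rintro ⟨v, hv, _, hfd, hmd⟩
    have := PySem.Int.floordiv_mul_add_mod v daily_shifts
    rw [hfd, hmd] at this
    rwa [this]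
  · intro hv
    refine ⟨_, hv, by positivity, ?_, ?_⟩
    · rw [PySem.Int.floordiv_eq_iff_of_pos hpos]
      constructor <;> nlinarith
    · have h1 := PySem.Int.floordiv_mul_add_mod ((d : Int) * daily_shifts + (s : Int)) daily_shifts
      have h2 : PySem.Int.floordiv ((d : Int) * daily_shifts + (s : Int)) daily_shifts = (d : Int) := by
        rw [PySem.Int.floordiv_eq_iff_of_pos hpos]
        constructor <;> nlinarith
      rw [h2] at h1; omega

theorem scatter_length (days daily_shifts : Int) (l : List Int) (g : List (List Bool)) :
    (l.foldl (pvStep days daily_shifts) g).length = g.length := by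
  induction l generalizing g with
  | nil => rfl
  | cons x xs ih => simp only [List.foldl_cons, ih, pvStep_length]

theorem scatter_row_length (days daily_shifts : Int) (l : List Int) (g : List (List Bool))
    (s : Nat) (hs : s < g.length) (hs' : s < (l.foldl (pvStep days daily_shifts) g).length) :
    (l.foldl (pvStep days daily_shifts) g)[s].length = g[s].length := by
  induction l generalizing g with
  | nil => rfl
  | cons x xs ih =>
    simp only [List.foldl_cons] at hs' ⊢
    have h1 : s < (pvStep days daily_shifts g x).length := by
      rw [pvStep_length]; exact hs
    rw [ih _ h1 hs', pvStep_row_length days daily_shifts g x s hs h1]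

theorem two_dimensional_calendar_eq_map (days daily_shifts : Int) (vsl : List Int) :
    two_dimensional_calendar days daily_shifts vsl =
      (List.range daily_shifts.toNat).map (fun (s : Nat) =>
        (List.range days.toNat).map (fun (d : Nat) =>
          decide (((d : Int) * daily_shifts + (s : Int)) ∈ vsl))) := by
  unfold two_dimensional_calendar
  rw [foldl_append_map]
  simp only [List.nil_append, PySem.List.pyRange_one, Int.sub_zero, List.map_map]
  apply List.map_congr_left
  intro s _
  simp only [Function.comp_apply]
  rw [foldl_append_map]
  simp [List.map_map, Function.comp]

-- ===== VERDICT (by name: the statement is the Claim_ definition above) =====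
theorem two_dimensional_calendar_spec : Claim_equal_two_dimensional_calendar := by
  intro days daily_shifts vsl _
  unfold Spec_two_dimensional_calendar
  rw [two_dimensional_calendar_eq_map]
  unfold two_dimensional_calendar_alt
  by_cases hpos : 0 < daily_shifts
  · simp only [hpos, if_true]
    have hfold : ∀ l : List Int, ∀ g : List (List Bool),
        l.foldl (fun g v =>
          if 0 ≤ v then
            if PySem.Int.floordiv v daily_shifts < days then
              g.modify (PySem.Int.mod v daily_shifts).toNat
                (fun row => row.set (PySem.Int.floordiv v daily_shifts).toNat true)
            else g
          else g) g = l.foldl (pvStep days daily_shifts) g := by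
      intro l; induction l with
      | nil => intro g; rfl
      | cons x xs ih => intro g; simp only [List.foldl_cons, ih]; rfl
    rw [hfold]
    apply List.ext_getElem
    · rw [scatter_length]; simp
    · intro s hsm hsG
      have hsRepl : s < (List.replicate daily_shifts.toNat (List.replicate days.toNat false)).length := by
        rwa [scatter_length] at hsG
      have hsR : s < daily_shifts.toNat := by simpa using hsRepl
      apply List.ext_getElem
      · rw [scatter_row_length days daily_shifts vsl _ s hsRepl hsG]; simp
      · intro d hdm hdG
        have hdRepl : d < (List.replicate daily_shifts.toNat (List.replicate days.toNat false))[s].length := by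
          rwa [scatter_row_length days daily_shifts vsl _ s hsRepl hsG] at hdG
        have hdR : d < days.toNat := by simpa using hdRepl
        rw [scatter_getElem days daily_shifts hpos vsl _ s d hsRepl hdRepl (by omega) hsG hdG]
        simp only [List.getElem_map, List.getElem_range, List.getElem_replicate, Bool.false_or]
        rw [decide_eq_decide]
        exact (mem_iff_divmod days daily_shifts hpos vsl s d (by omega)).symm
  · have hle : daily_shifts ≤ 0 := by omega
    simp [hpos, Int.toNat_of_nonpos hle]
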